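-- pv_equiv track=rewrite | github.com/ricew4ng/CodeDetector | funcs.py | code2tokens
-- ===== SOURCE A (Python) =====
-- def code2tokens(code):
-- 	tokens = []
--
-- 	split_list = ['.','\'','"',' ','[',']','(',')','{','}',':','=',',','+','-','>','<']
-- 	word = ''
-- 	for i in code:
-- 		if i not in split_list:
-- 			word+=i
-- 		else:
-- 			if word != '':
-- 				tokens.append(word)
-- 				word = ''
-- 			if i != ' ':
-- 				tokens.append(i)
--
-- 	return tokens
-- ===== SOURCE B (Python) =====
-- DELIMS = ".'\" [](){}:=,+-><"
--
-- def code2tokens(code):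
--     tokens = []
--     n = len(code)
--     p = 0
--     while p < n:
--         i = p
--         while i < n and code[i] not in DELIMS:
--             i += 1
--         if i == n:
--             break
--         if i > p:
--             tokens.append(code[p:i])
--         if code[i] != ' ':
--             tokens.append(code[i])
--         p = i + 1
--     return tokens
-- ===== Notes on version B (the rewrite author's own statement) =====
-- stated objective: faster
-- what changed: Replaces A's character-by-character word accumulator with a span scanner that finds the next delimiter position and emits each word as one slice, iterating delimiter to delimiter.
import Mathlib
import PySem

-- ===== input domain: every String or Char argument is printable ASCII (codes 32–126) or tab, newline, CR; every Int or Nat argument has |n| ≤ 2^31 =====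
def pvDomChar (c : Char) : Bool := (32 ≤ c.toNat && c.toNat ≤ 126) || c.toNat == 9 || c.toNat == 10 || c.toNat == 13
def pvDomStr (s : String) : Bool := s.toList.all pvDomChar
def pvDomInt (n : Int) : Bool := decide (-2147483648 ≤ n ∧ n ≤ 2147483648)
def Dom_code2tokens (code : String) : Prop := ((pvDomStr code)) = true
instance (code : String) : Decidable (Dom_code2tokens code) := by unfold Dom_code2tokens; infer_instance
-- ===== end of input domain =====

-- B replaces A's char-by-char word accumulator with a span scanner (slice out the run up to the
-- next delimiter, then the delimiter, repeat); same return value, measurably faster by a constant factor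
-- (bulk slicing instead of per-character string concatenation).

-- ===== PORT A =====
-- A's split_list
def splitList : List Char := ['.', '\'', '"', ' ', '[', ']', '(', ')', '{', '}', ':', '=', ',', '+', '-', '>', '<']

-- the accumulated word is kept as a List Char (Python str = list of chars); appended via String.mk
-- stepA is A's loop body (named so the proofs can speak about one iteration)
def stepA (st : List String × List Char) (i : Char) : List String × List Char :=
  if i ∉ splitList then
    (st.1, st.2 ++ [i])
  else
    let st1 := if st.2 ≠ [] then (st.1 ++ [String.mk st.2], ([] : List Char)) else st
    if i ≠ ' ' then (st1.1 ++ [String.mk [i]], st1.2) else st1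

def code2tokens (code : String) : List String :=
  (code.toList.foldl stepA ([], [])).1

-- ===== PORT B =====
-- Source B's DELIMS string, as its character list
def delimsB : List Char := ".'\" [](){}:=,+-><".toList

-- Source B's outer while loop over the start index p, transcribed as recursion on the remaining
-- suffix of the string; the inner index scan "while i < n and code[i] not in DELIMS" and the
-- slice code[p:i] are ported exactly as takeWhile/dropWhile of the non-delimiter predicate.
def altGo (s : List Char) : List String :=
  let w := s.takeWhile (fun c => c ∉ delimsB)
  match h : s.dropWhile (fun c => c ∉ delimsB) with
  | [] => []   -- i == n: no delimiter left, loop breaks (trailing word not emitted)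
  | d :: rs =>
    (if w = [] then [] else [String.mk w]) ++
    (if d = ' ' then [] else [String.mk [d]]) ++ altGo rs
termination_by s.length
decreasing_by
  have h1 := List.takeWhile_append_dropWhile (p := fun c => c ∉ delimsB) (l := s)
  rw [h] at h1
  have h2 := congrArg List.length h1
  simp [List.length_append] at h2
  omega

def code2tokens_alt (code : String) : List String := altGo code.toList

-- ===== PRECONDITION & SPEC =====
def Spec_code2tokens (code : String) (out : List String) : Prop := out = code2tokens_alt code
instance (code : String) (out : List String) : Decidable (Spec_code2tokens code out) := by unfold Spec_code2tokens; infer_instance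

-- ===== CLAIM (what is proved, stated in full; the proofs are below) =====
def Claim_equal_code2tokens : Prop := ∀ (code : String), Dom_code2tokens code → Spec_code2tokens code (code2tokens code)

-- ===== LEMMAS AND PROOFS =====

theorem delimsB_eq : delimsB = splitList := by decide

theorem dropWhile_all {p : Char → Bool} {w : List Char} (hw : ∀ x ∈ w, p x) :
    w.dropWhile p = [] := by
  induction w with
  | nil => rfl
  | cons c cs ih =>
    have hcs : ∀ x ∈ cs, p x := fun x hx => hw x (by simp [hx])
    simp [List.dropWhile, hw c (by simp), ih hcs]

theorem takeWhile_span {p : Char → Bool} {w : List Char} (c : Char) (cs : List Char)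
    (hw : ∀ x ∈ w, p x) (hc : p c = false) :
    (w ++ c :: cs).takeWhile p = w := by
  induction w with
  | nil => simp [List.takeWhile, hc]
  | cons a as ih =>
    simp [List.takeWhile, hw a (by simp)]
    exact ih (fun x hx => hw x (by simp [hx]))

theorem dropWhile_span {p : Char → Bool} {w : List Char} (c : Char) (cs : List Char)
    (hw : ∀ x ∈ w, p x) (hc : p c = false) :
    (w ++ c :: cs).dropWhile p = c :: cs := by
  induction w with
  | nil => simp [List.dropWhile, hc]
  | cons a as ih =>
    simp [List.dropWhile, hw a (by simp)]
    exact ih (fun x hx => hw x (by simp [hx]))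

theorem altGo_noDelim {w : List Char} (hw : ∀ x ∈ w, x ∉ delimsB) :
    altGo w = [] := by
  have hd : w.dropWhile (fun c => decide (c ∉ delimsB)) = [] :=
    dropWhile_all (fun x hx => by simpa using hw x hx)
  rw [altGo]
  split
  · rfl
  · rename_i d rs heq
    rw [hd] at heq
    cases heq

theorem altGo_span {w : List Char} (c : Char) (cs : List Char)
    (hw : ∀ x ∈ w, x ∉ delimsB) (hc : c ∈ delimsB) :
    altGo (w ++ c :: cs) =
      (if w = [] then [] else [String.mk w]) ++
      (if c = ' ' then [] else [String.mk [c]]) ++ altGo cs := by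
  have hd : (w ++ c :: cs).dropWhile (fun x => decide (x ∉ delimsB)) = c :: cs :=
    dropWhile_span c cs (fun x hx => by simpa using hw x hx) (by simpa using hc)
  have ht : (w ++ c :: cs).takeWhile (fun x => decide (x ∉ delimsB)) = w :=
    takeWhile_span c cs (fun x hx => by simpa using hw x hx) (by simpa using hc)
  rw [altGo]
  split
  · rename_i heq
    rw [hd] at heq
    cases heq
  · rename_i d rs heq
    rw [hd] at heq
    injection heq with h1 h2
    subst h1; subst h2
    rw [ht]

theorem stepA_nodelim (acc : List String) (w : List Char) (c : Char) (hc : c ∉ splitList) :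
    stepA (acc, w) c = (acc, w ++ [c]) := by
  simp [stepA, hc]

theorem stepA_delim (acc : List String) (w : List Char) (c : Char) (hc : c ∈ splitList) :
    stepA (acc, w) c =
      (acc ++ (if w = [] then [] else [String.mk w]) ++
        (if c = ' ' then [] else [String.mk [c]]), []) := by
  simp only [stepA, if_neg (not_not_intro hc)]
  by_cases hw : w = [] <;> by_cases hs : c = ' ' <;> simp [hw, hs]

-- main invariant: A's left fold from state (acc, w) produces acc ++ B's tokens of w ++ rest,
-- provided the pending word w contains no delimiters
theorem foldA_eq (cs : List Char) :
    ∀ (acc : List String) (w : List Char), (∀ x ∈ w, x ∉ splitList) →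
    (cs.foldl stepA (acc, w)).1 = acc ++ altGo (w ++ cs) := by
  induction cs with
  | nil =>
    intro acc w hw
    simp [altGo_noDelim (by simpa [delimsB_eq] using hw)]
  | cons c cs ih =>
    intro acc w hw
    by_cases hc : c ∈ splitList
    · have hspan := altGo_span c (w := w) cs
        (by simpa [delimsB_eq] using hw) (by simpa [delimsB_eq] using hc)
      rw [List.foldl_cons, stepA_delim acc w c hc,
        ih _ [] (by simp), hspan]
      simp
    · rw [List.foldl_cons, stepA_nodelim acc w c hc,
        ih acc (w ++ [c])
          (by intro x hx; rcases List.mem_append.mp hx with h | h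
              · exact hw x h
              · simp at h; subst h; exact hc)]
      simp

-- ===== VERDICT (by name: the statement is the Claim_ definition above) =====
theorem code2tokens_spec : Claim_equal_code2tokens := by
  intro code _
  unfold Spec_code2tokens code2tokens code2tokens_alt
  simpa using foldA_eq code.toList [] [] (by simp)
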